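-- pv_equiv track=rewrite | github.com/Middeline/FIB | LP/bot/skyline.py | pointsToBuildings
-- ===== SOURCE A (Python) =====
-- def pointsToBuildings(points):  # Cost: O(p)
--     edificis = []
--     h = 0
--     xmin = 0
--     for p in points:
--         if h != 0:
--             edificis.append((xmin, h, p[0]))
--
--         xmin = p[0]
--         h = p[1]
--
--     return edificis
-- ===== SOURCE B (Python) =====
-- def pointsToBuildings(points):
--     # Recursive decomposition: a building starts at the first point (if its
--     # height is nonzero) and ends at the next point's x; the rest of the
--     # skyline is translated by recursing on the tail.
--     if len(points) < 2:
--         return []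
--     x, h = points[0]
--     rest = points[1:]
--     head = [(x, h, rest[0][0])] if h != 0 else []
--     return head + pointsToBuildings(rest)
-- ===== Notes on version B (the rewrite author's own statement) =====
-- stated objective: alternative
-- what changed: Replaces A's iterative loop threading mutable (xmin, h) state through an accumulator with a structural recursion that emits the head building (when its height is nonzero) and concatenates the recursive result on the tail.
import Mathlib
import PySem

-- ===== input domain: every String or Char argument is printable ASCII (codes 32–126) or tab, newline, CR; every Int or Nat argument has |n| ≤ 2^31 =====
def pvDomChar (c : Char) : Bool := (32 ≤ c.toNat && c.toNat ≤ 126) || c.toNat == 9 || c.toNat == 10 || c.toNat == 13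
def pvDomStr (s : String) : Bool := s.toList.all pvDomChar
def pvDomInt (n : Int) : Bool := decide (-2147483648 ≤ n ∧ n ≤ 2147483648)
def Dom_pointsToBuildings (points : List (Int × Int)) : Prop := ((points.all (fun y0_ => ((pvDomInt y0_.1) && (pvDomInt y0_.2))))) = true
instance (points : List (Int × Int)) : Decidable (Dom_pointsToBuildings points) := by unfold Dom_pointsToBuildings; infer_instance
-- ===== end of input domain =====

-- B replaces A's stateful accumulator loop with a structural recursion on the list (same cost; different decomposition).

-- ===== PORT A =====
-- loop state: (edificis, h, xmin), exactly A's variables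
def pointsToBuildings (points : List (Int × Int)) : List (Int × Int × Int) :=
  (points.foldl
    (fun st p =>
      let edificis := if st.2.1 ≠ 0 then st.1 ++ [(st.2.2, st.2.1, p.1)] else st.1
      (edificis, p.2, p.1))
    (([] : List (Int × Int × Int)), (0 : Int), (0 : Int))).1

-- ===== PORT B =====
-- Source B's recursion: fewer than two points → []; else emit head building (if h ≠ 0) ++ recurse on the tail
def pointsToBuildings_alt : List (Int × Int) → List (Int × Int × Int)
  | [] => []
  | [_] => []
  | (x, h) :: q :: rest =>
    (if h ≠ 0 then [(x, h, q.1)] else []) ++ pointsToBuildings_alt (q :: rest)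

-- ===== PRECONDITION & SPEC =====
def Spec_pointsToBuildings (points : List (Int × Int)) (out : List (Int × Int × Int)) : Prop := out = pointsToBuildings_alt points
instance (points : List (Int × Int)) (out : List (Int × Int × Int)) : Decidable (Spec_pointsToBuildings points out) := by unfold Spec_pointsToBuildings; infer_instance

-- ===== CLAIM (what is proved, stated in full; the proofs are below) =====
def Claim_equal_pointsToBuildings : Prop := ∀ (points : List (Int × Int)), Dom_pointsToBuildings points → Spec_pointsToBuildings points (pointsToBuildings points)

-- ===== LEMMAS AND PROOFS =====
theorem pv_fold_eq (points : List (Int × Int)) :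
    ∀ (ed : List (Int × Int × Int)) (h x : Int),
    (points.foldl
      (fun st p =>
        (if st.2.1 ≠ 0 then st.1 ++ [(st.2.2, st.2.1, p.1)] else st.1, p.2, p.1))
      (ed, h, x)).1
    = (match points with
       | [] => ed
       | p :: _ => if h ≠ 0 then ed ++ [(x, h, p.1)] else ed) ++ pointsToBuildings_alt points := by
  induction points with
  | nil => intro ed h x; simp [pointsToBuildings_alt]
  | cons p rest ih =>
    intro ed h x
    rw [List.foldl_cons, ih]
    cases rest with
    | nil => simp [pointsToBuildings_alt]
    | cons q rest' =>
      simp only [pointsToBuildings_alt]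
      split_ifs <;> simp

-- ===== VERDICT (by name: the statement is the Claim_ definition above) =====
theorem pointsToBuildings_spec : Claim_equal_pointsToBuildings := by
  intro points _
  unfold Spec_pointsToBuildings pointsToBuildings
  rw [pv_fold_eq]
  cases points <;> simp
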